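-- pv_equiv track=rewrite | github.com/yannickloth/W33-Theory | tools/analyze_firewall_combinatorics.py | try_sum_of_two_binomials
-- ===== SOURCE A (Python) =====
-- import math
-- from typing import Dict, List, Tuple
--
-- def is_binomial(n: int, max_row: int = 30) -> List[Tuple[int, int]]:
--     matches = []
--     for r in range(max_row + 1):
--         for k in range(r + 1):
--             if math.comb(r, k) == n:
--                 matches.append((r, k))
--     return matches
--
-- def try_sum_of_two_binomials(n: int, max_row: int = 30):
--     for r1 in range(max_row + 1):
--         for k1 in range(r1 + 1):
--             v1 = math.comb(r1, k1)
--             if v1 >= n: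
--                 continue
--             rem = n - v1
--             if is_binomial(rem, max_row):
--                 return (r1, k1, rem)
--     return None
-- ===== SOURCE B (Python) =====
-- import math
--
--
-- def try_sum_of_two_binomials(n: int, max_row: int = 30):
--     # One pass builds every (r, k, C(r, k)) triple and the set of binomial values;
--     # the answer is then the first triple whose complement is in the set.
--     pairs = [(r, k, math.comb(r, k)) for r in range(max_row + 1) for k in range(r + 1)]
--     vals = {v for _, _, v in pairs}
--     return next(((r, k, n - v) for r, k, v in pairs if v < n and n - v in vals), None)
-- ===== Notes on version B (the rewrite author's own statement) =====
-- stated objective: alternative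
-- what changed: B builds the list of (r,k,C(r,k)) triples and the set of all binomial values once, then finds the first triple whose complement n-v is in the set, replacing A's is_binomial rescan of all (r,k) pairs at every candidate.
import Mathlib
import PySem

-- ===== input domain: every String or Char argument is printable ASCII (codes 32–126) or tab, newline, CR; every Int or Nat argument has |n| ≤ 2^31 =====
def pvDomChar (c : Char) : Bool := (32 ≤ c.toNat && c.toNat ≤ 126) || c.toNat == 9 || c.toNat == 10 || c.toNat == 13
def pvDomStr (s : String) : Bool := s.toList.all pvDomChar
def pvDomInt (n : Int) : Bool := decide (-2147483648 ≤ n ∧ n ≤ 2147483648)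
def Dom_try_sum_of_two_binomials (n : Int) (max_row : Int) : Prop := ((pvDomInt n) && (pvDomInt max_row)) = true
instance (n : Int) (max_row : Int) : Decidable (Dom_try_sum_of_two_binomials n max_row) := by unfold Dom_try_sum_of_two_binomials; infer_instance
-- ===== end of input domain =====

-- B precomputes the set of all binomial values once and tests membership, instead of A's
-- is_binomial rescan of all (r,k) pairs at every candidate: an alternative algorithm.

-- ===== PORT A =====
-- math.comb(r, k); only ever called with 0 ≤ k ≤ r here
def pvComb (r k : Int) : Int := (Nat.choose r.toNat k.toNat : Int)

def pvIsBinomial (n : Int) (max_row : Int) : List (Int × Int) :=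
  (PySem.List.pyRange 0 (max_row + 1) 1).foldl (fun m r =>
    (PySem.List.pyRange 0 (r + 1) 1).foldl (fun m2 k =>
      if pvComb r k = n then m2 ++ [(r, k)] else m2) m) []

def try_sum_of_two_binomials (n : Int) (max_row : Int) : Option (List Int) :=
  (PySem.List.pyRange 0 (max_row + 1) 1).foldl (fun acc r1 =>
    (PySem.List.pyRange 0 (r1 + 1) 1).foldl (fun acc2 k1 =>
      acc2.or   -- an early `return` inside the loop: keep the first produced value
        (let v1 := pvComb r1 k1
         if v1 ≥ n then none
         else
           let rem := n - v1
           if pvIsBinomial rem max_row = [] then none else some [r1, k1, rem])) acc) none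

-- ===== PORT B =====
def pvPairs (max_row : Int) : List (Int × Int × Int) :=
  (PySem.List.pyRange 0 (max_row + 1) 1).flatMap (fun r =>
    (PySem.List.pyRange 0 (r + 1) 1).map (fun k => (r, k, pvComb r k)))

def try_sum_of_two_binomials_alt (n : Int) (max_row : Int) : Option (List Int) :=
  let pairs := pvPairs max_row
  let vals : PySem.Set Int := PySem.Set.ofList (pairs.map (fun t => t.2.2))
  (pairs.find? (fun t => t.2.2 < n && PySem.Set.contains vals (n - t.2.2))).map
    (fun t => [t.1, t.2.1, n - t.2.2])

-- ===== PRECONDITION & SPEC =====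
def Spec_try_sum_of_two_binomials (n : Int) (max_row : Int) (out : Option (List Int)) : Prop := out = try_sum_of_two_binomials_alt n max_row
instance (n : Int) (max_row : Int) (out : Option (List Int)) : Decidable (Spec_try_sum_of_two_binomials n max_row out) := by unfold Spec_try_sum_of_two_binomials; infer_instance

-- ===== CLAIM (what is proved, stated in full; the proofs are below) =====
def Claim_equal_try_sum_of_two_binomials : Prop := ∀ (n : Int) (max_row : Int), Dom_try_sum_of_two_binomials n max_row → Spec_try_sum_of_two_binomials n max_row (try_sum_of_two_binomials n max_row)

-- ===== LEMMAS AND PROOFS =====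

-- A fold that keeps the first `some` is `findSome?`.
theorem pv_foldl_firstSome {α β : Type} (f : α → Option β) :
    ∀ (l : List α) (init : Option β),
      l.foldl (fun acc x => acc.or (f x)) init = init.or (l.findSome? f) := by
  intro l
  induction l with
  | nil => intro init; simp
  | cons x l ih =>
      intro init
      simp only [List.foldl_cons, List.findSome?_cons, ih, Option.or_assoc]
      cases h : f x <;> simp

theorem pv_findSome?_flatMap {α β γ : Type} (g : α → List β) (f : β → Option γ) :
    ∀ (l : List α), (l.flatMap g).findSome? f = l.findSome? (fun x => (g x).findSome? f) := by
  intro l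
  induction l with
  | nil => rfl
  | cons x l ih =>
      simp only [List.flatMap_cons, List.findSome?_append, ih]
      cases h : List.findSome? f (g x) <;> simp [h]

theorem pv_find?_map_eq_findSome? {α β : Type} (p : α → Bool) (g : α → β) :
    ∀ (l : List α), (l.find? p).map g = l.findSome? (fun x => if p x then some (g x) else none) := by
  intro l
  induction l with
  | nil => rfl
  | cons x l ih =>
      by_cases h : p x = true
      · simp [h]
      · simp only [Bool.not_eq_true] at h
        simp [h, ih]

-- is_binomial as a flatMap of filters
theorem pvIsBinomial_eq (n max_row : Int) :
    pvIsBinomial n max_row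
      = (PySem.List.pyRange 0 (max_row + 1) 1).flatMap (fun r =>
          ((PySem.List.pyRange 0 (r + 1) 1).filter (fun k => decide (pvComb r k = n))).map
            (fun k => (r, k))) := by
  unfold pvIsBinomial
  rw [PySem.List.foldl_congr_mem (g := fun m r =>
    m ++ ((PySem.List.pyRange 0 (r + 1) 1).filter (fun k => decide (pvComb r k = n))).map
      (fun k => (r, k)))]
  · rw [PySem.List.foldl_append_eq_flatMap]; simp
  · intro m r _
    rw [PySem.List.foldl_append_ite (p := fun k => pvComb r k = n) (f := fun k => (r, k))]

-- A's "is_binomial(rem) is truthy" is B's set membership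
theorem pvIsBinomial_ne_nil_iff (m max_row : Int) :
    pvIsBinomial m max_row ≠ [] ↔ m ∈ (pvPairs max_row).map (fun t => t.2.2) := by
  rw [pvIsBinomial_eq]
  unfold pvPairs
  simp only [ne_eq, List.flatMap_eq_nil_iff, List.map_eq_nil_iff, List.filter_eq_nil_iff,
    not_forall, List.mem_map, List.mem_flatMap]
  constructor
  · rintro ⟨r, hr, ⟨k, hk, hc⟩⟩
    exact ⟨(r, k, pvComb r k), ⟨r, hr, ⟨k, hk, rfl⟩⟩, by simpa using hc⟩
  · rintro ⟨t, ⟨r, hr, ⟨k, hk, rfl⟩⟩, hv⟩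
    exact ⟨r, hr, k, hk, by simpa using hv⟩

-- ===== VERDICT (by name: the statement is the Claim_ definition above) =====
theorem try_sum_of_two_binomials_spec : Claim_equal_try_sum_of_two_binomials := by
  intro n max_row _
  show try_sum_of_two_binomials n max_row = try_sum_of_two_binomials_alt n max_row
  have hA : try_sum_of_two_binomials n max_row
      = (PySem.List.pyRange 0 (max_row + 1) 1).findSome? (fun r1 =>
          (PySem.List.pyRange 0 (r1 + 1) 1).findSome? (fun k1 =>
            if pvComb r1 k1 ≥ n then none
            else if pvIsBinomial (n - pvComb r1 k1) max_row = [] then none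
            else some [r1, k1, n - pvComb r1 k1])) := by
    unfold try_sum_of_two_binomials
    rw [PySem.List.foldl_congr_mem (g := fun acc r1 =>
      acc.or ((PySem.List.pyRange 0 (r1 + 1) 1).findSome? (fun k1 =>
        if pvComb r1 k1 ≥ n then none
        else if pvIsBinomial (n - pvComb r1 k1) max_row = [] then none
        else some [r1, k1, n - pvComb r1 k1])))]
    · rw [pv_foldl_firstSome]; simp
    · intro acc r1 _
      exact pv_foldl_firstSome (f := fun k1 =>
        if pvComb r1 k1 ≥ n then none
        else if pvIsBinomial (n - pvComb r1 k1) max_row = [] then none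
        else some [r1, k1, n - pvComb r1 k1]) _ acc
  have hB : try_sum_of_two_binomials_alt n max_row
      = (pvPairs max_row).findSome? (fun t =>
          if (decide (t.2.2 < n) && PySem.Set.contains
              (PySem.Set.ofList ((pvPairs max_row).map (fun t => t.2.2))) (n - t.2.2))
          then some [t.1, t.2.1, n - t.2.2] else none) := by
    unfold try_sum_of_two_binomials_alt
    exact pv_find?_map_eq_findSome? _ _ _
  rw [hA, hB]
  conv_rhs => rw [pvPairs]
  rw [pv_findSome?_flatMap]
  simp only [List.findSome?_map]
  congr 1
  funext r1
  congr 1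
  funext k1
  simp only [Function.comp_apply]
  have hmem := pvIsBinomial_ne_nil_iff (n - pvComb r1 k1) max_row
  by_cases h1 : pvComb r1 k1 < n
  · by_cases h2 : pvIsBinomial (n - pvComb r1 k1) max_row = []
    · have hnot : (n - pvComb r1 k1) ∉ (pvPairs max_row).map (fun t => t.2.2) :=
        fun h => hmem.mpr h h2
      have hc : ((PySem.Set.ofList ((pvPairs max_row).map (fun t => t.2.2))).contains
          (n - pvComb r1 k1)) = false := by
        simp only [PySem.Set.contains_eq_listContains, List.contains_eq_mem,
          PySem.Set.mem_ofList, decide_eq_false_iff_not]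
        exact hnot
      rw [pvPairs] at hc
      rw [if_neg (not_le.mpr h1), if_pos h2, hc]
      simp
    · have hin : (n - pvComb r1 k1) ∈ (pvPairs max_row).map (fun t => t.2.2) := hmem.mp h2
      have hc : ((PySem.Set.ofList ((pvPairs max_row).map (fun t => t.2.2))).contains
          (n - pvComb r1 k1)) = true := by
        simp only [PySem.Set.contains_eq_listContains, List.contains_eq_mem,
          PySem.Set.mem_ofList, decide_eq_true_eq]
        exact hin
      rw [pvPairs] at hc
      rw [if_neg (not_le.mpr h1), if_neg h2, hc]
      simp [h1]
  · rw [if_pos (not_lt.mp h1)]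
    simp [h1]
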